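-- pv_equiv track=rewrite | github.com/anaismartins/deploying-custom-nn-in-fpga | figures/utils.py | calculate_best_epochs
-- ===== SOURCE A (Python) =====
-- def calculate_best_epochs(epoch_steps, best_epochs):
--     # Initialize lists to store the total epochs and the best epochs calculated
--     total_epochs = []
--     best_epochs_calculated = []
--
--     # Initialize a variable to keep track of the cumulative sum of epoch steps
--     cs = 0
--
--     # Calculate the total epochs and the best epochs for each step
--     for i in range(len(epoch_steps)):
--         cs += epoch_steps[i]
--         total_epochs.append(cs)
--         best_epoch_at_step = (sum(epoch_steps[:i]) if i > 0 else 0) + best_epochs[i]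
--         best_epochs_calculated.append(best_epoch_at_step)
--     return best_epochs_calculated
-- ===== SOURCE B (Python) =====
-- def calculate_best_epochs(epoch_steps, best_epochs):
--     # One pass: keep a running prefix sum instead of re-summing the slice.
--     result = []
--     prefix = 0
--     for step, best in zip(epoch_steps, best_epochs):
--         result.append(prefix + best)
--         prefix += step
--     return result
-- ===== Notes on version B (the rewrite author's own statement) =====
-- stated objective: faster
-- what changed: replaces the per-index re-summation of epoch_steps[:i] by a single pass over zipped (step, best) pairs that maintains a running prefix sum
import Mathlib
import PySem

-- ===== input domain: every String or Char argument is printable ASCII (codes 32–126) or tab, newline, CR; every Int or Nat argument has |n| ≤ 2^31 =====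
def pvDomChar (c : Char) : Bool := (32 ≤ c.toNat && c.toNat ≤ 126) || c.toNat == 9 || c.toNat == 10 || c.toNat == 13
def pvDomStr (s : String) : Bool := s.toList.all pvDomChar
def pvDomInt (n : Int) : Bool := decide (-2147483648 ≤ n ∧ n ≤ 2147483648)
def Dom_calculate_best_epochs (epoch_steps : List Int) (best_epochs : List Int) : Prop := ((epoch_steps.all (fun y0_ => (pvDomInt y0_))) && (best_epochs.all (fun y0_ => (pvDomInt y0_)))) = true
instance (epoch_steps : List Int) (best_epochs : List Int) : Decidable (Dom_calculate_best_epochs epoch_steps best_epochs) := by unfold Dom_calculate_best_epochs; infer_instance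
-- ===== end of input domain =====

-- B replaces A's per-index re-summation of epoch_steps[:i] by a single pass with a running prefix sum (asymptotically faster).


-- ===== PORT A =====
-- loop body: cs accumulates, total_epochs is built (and discarded), best_epochs_calculated appends
-- (sum(epoch_steps[:i]) if i > 0 else 0) + best_epochs[i]
def calculate_best_epochs (epoch_steps : List Int) (best_epochs : List Int) : List Int :=
  ((List.range epoch_steps.length).foldl
    (fun (st : Int × List Int × List Int) i =>
      let cs := st.1 + epoch_steps.getD i 0
      let total_epochs := st.2.1 ++ [cs]
      let best_epoch_at_step :=
        (if 0 < i then (PySem.List.slice epoch_steps none (some (i : Int))).sum else 0)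
          + best_epochs.getD i 0
      (cs, total_epochs, st.2.2 ++ [best_epoch_at_step]))
    (0, [], [])).2.2

-- ===== PORT B =====
def calculate_best_epochs_altGo (pref : Int) : List Int → List Int → List Int
  | s :: ss, b :: bs => (pref + b) :: calculate_best_epochs_altGo (pref + s) ss bs
  | _, _ => []

def calculate_best_epochs_alt (epoch_steps : List Int) (best_epochs : List Int) : List Int :=
  calculate_best_epochs_altGo 0 epoch_steps best_epochs

-- ===== PRECONDITION & SPEC =====
-- A raises IndexError on best_epochs[i] when best_epochs is shorter than epoch_steps.
def Pre_calculate_best_epochs (epoch_steps : List Int) (best_epochs : List Int) : Prop :=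
  epoch_steps.length ≤ best_epochs.length
instance (epoch_steps : List Int) (best_epochs : List Int) : Decidable (Pre_calculate_best_epochs epoch_steps best_epochs) := by unfold Pre_calculate_best_epochs; infer_instance
def pvWitness_calculate_best_epochs : List Int × List Int := ([2, 3, 1], [1, 2, 2])

def Spec_calculate_best_epochs (epoch_steps : List Int) (best_epochs : List Int) (out : List Int) : Prop := out = calculate_best_epochs_alt epoch_steps best_epochs
instance (epoch_steps : List Int) (best_epochs : List Int) (out : List Int) : Decidable (Spec_calculate_best_epochs epoch_steps best_epochs out) := by unfold Spec_calculate_best_epochs; infer_instance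

-- ===== CLAIM (what is proved, stated in full; the proofs are below) =====
def Claim_equal_calculate_best_epochs : Prop := ∀ (epoch_steps : List Int) (best_epochs : List Int), Dom_calculate_best_epochs epoch_steps best_epochs → Pre_calculate_best_epochs epoch_steps best_epochs → Spec_calculate_best_epochs epoch_steps best_epochs (calculate_best_epochs epoch_steps best_epochs)

-- ===== LEMMAS AND PROOFS =====

-- A's third state component collects a value depending only on the index.
theorem calcA_foldl_third (es bs : List Int) (n : Nat) (cs0 : Int) (t0 a0 : List Int) :
    (((List.range n).foldl
      (fun (st : Int × List Int × List Int) i =>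
        let cs := st.1 + es.getD i 0
        let total_epochs := st.2.1 ++ [cs]
        let best_epoch_at_step :=
          (if 0 < i then (PySem.List.slice es none (some (i : Int))).sum else 0)
            + bs.getD i 0
        (cs, total_epochs, st.2.2 ++ [best_epoch_at_step]))
      (cs0, t0, a0)).2.2)
    = a0 ++ (List.range n).map
        (fun (i : Nat) => (if 0 < i then (PySem.List.slice es none (some (i : Int))).sum else 0) + bs.getD i 0) := by
  induction n generalizing cs0 t0 a0 with
  | zero => simp
  | succ n ih =>
    rw [List.range_succ, List.foldl_append, List.map_append]
    simp only [List.foldl_cons, List.foldl_nil]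
    generalize hst : ((List.range n).foldl _ (cs0, t0, a0)) = st
    have h3 := hst ▸ ih cs0 t0 a0
    simp [h3, List.append_assoc]

theorem altGo_eq_map (es : List Int) : ∀ (bs : List Int) (p : Int), es.length ≤ bs.length →
    calculate_best_epochs_altGo p es bs
    = (List.range es.length).map (fun i => p + (es.take i).sum + bs.getD i 0) := by
  induction es with
  | nil => intro bs p _; simp [calculate_best_epochs_altGo]
  | cons s ss ih =>
    intro bs p h
    cases bs with
    | nil => simp at h
    | cons b bs' =>
      simp only [calculate_best_epochs_altGo, List.length_cons,
        List.range_succ_eq_map, List.map_cons, List.map_map]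
      congr 1
      · simp
      · rw [ih bs' (p + s) (by simpa using h)]
        apply List.map_congr_left
        intro i _
        simp [List.sum_cons]
        ring

theorem calculate_best_epochs_spec : Claim_equal_calculate_best_epochs := by
  intro es bs _ hpre
  unfold Spec_calculate_best_epochs calculate_best_epochs calculate_best_epochs_alt
  rw [calcA_foldl_third, altGo_eq_map es bs 0 hpre, List.nil_append]
  apply List.map_congr_left
  intro i hi
  rcases Nat.eq_zero_or_pos i with h0 | hpos
  · subst h0; simp
  · rw [if_pos hpos, PySem.List.slice_to_natCast]
    simp
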